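-- pv_equiv track=rewrite | github.com/locle1011/bloxorz-solver | bloxorz/run.py | getMaxRowCol
-- ===== SOURCE A (Python) =====
-- def getMaxRowCol(state):
--     pass
--     maxrow = 0
--     maxcol = 0
--     col = 0
--     for i in range(0, len(state)):
--         if (state[i] != '\n'):
--             col += 1
--         else:
--             maxrow += 1
--             if col > maxcol:
--                 maxcol = col
--             col = 0
--
--     return (maxrow, maxcol)
-- ===== SOURCE B (Python) =====
-- def getMaxRowCol(state):
--     lines = state.split('\n')
--     return (len(lines) - 1, max((len(line) for line in lines[:-1]), default=0))
-- ===== Notes on version B (the rewrite author's own statement) =====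
-- stated objective: faster
-- what changed: Replaces the char-by-char counter loop carrying (maxrow, maxcol, col) state with a split on the newline character followed by a max over the lengths of the terminated lines.
import Mathlib
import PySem

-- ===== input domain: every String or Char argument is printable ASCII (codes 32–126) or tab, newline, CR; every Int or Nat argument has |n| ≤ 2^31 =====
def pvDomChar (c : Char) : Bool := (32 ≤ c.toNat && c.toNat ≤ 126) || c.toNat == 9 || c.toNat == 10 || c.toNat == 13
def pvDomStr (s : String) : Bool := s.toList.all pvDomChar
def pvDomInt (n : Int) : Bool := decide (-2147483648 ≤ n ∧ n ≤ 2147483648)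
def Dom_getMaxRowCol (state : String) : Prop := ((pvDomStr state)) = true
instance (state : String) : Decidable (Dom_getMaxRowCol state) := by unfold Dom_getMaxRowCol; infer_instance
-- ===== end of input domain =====

-- B replaces A's char-by-char counter loop with split('\n') followed by a max over line lengths (simpler decomposition).

-- ===== PORT A =====
-- loop body of A: the if/else over one character, carried state (maxrow, maxcol, col)
def pvStepA (acc : Int × Int × Int) (ch : Char) : Int × Int × Int :=
  if ch ≠ '\n' then (acc.1, acc.2.1, acc.2.2 + 1)
  else (acc.1 + 1, if acc.2.2 > acc.2.1 then acc.2.2 else acc.2.1, 0)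

-- the for-loop over state[i], carrying (maxrow, maxcol, col)
def getMaxRowCol (state : String) : Int × Int :=
  let r := state.toList.foldl pvStepA (0, 0, 0)
  (r.1, r.2.1)

-- ===== PORT B =====
-- lines = state.split('\n'); return (len(lines)-1, max((len(l) for l in lines[:-1]), default=0))
def getMaxRowCol_alt (state : String) : Int × Int :=
  let lines := PySem.Chars.splitOn state.toList ['\n']  -- state.split('\n'), exact
  ((lines.length : Int) - 1,
   PySem.List.maxD (lines.dropLast.map (fun l => (l.length : Int))) (fun x => x) 0)

-- ===== PRECONDITION & SPEC =====
def Spec_getMaxRowCol (state : String) (out : Int × Int) : Prop := out = getMaxRowCol_alt state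
instance (state : String) (out : Int × Int) : Decidable (Spec_getMaxRowCol state out) := by unfold Spec_getMaxRowCol; infer_instance

-- ===== CLAIM (what is proved, stated in full; the proofs are below) =====
def Claim_equal_getMaxRowCol : Prop := ∀ (state : String), Dom_getMaxRowCol state → Spec_getMaxRowCol state (getMaxRowCol state)

-- ===== LEMMAS AND PROOFS =====

-- lengths (as Ints) of the completed lines of l, the first one extended by c
def pvSegs (l : List Char) (c : Int) : List Int :=
  match l with
  | [] => []
  | '\n' :: t => c :: pvSegs t 0
  | _ :: t => pvSegs t (c + 1)

-- length of the trailing (unterminated) segment, extended by c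
def pvLast (l : List Char) (c : Int) : Int :=
  match l with
  | [] => c
  | '\n' :: t => pvLast t 0
  | _ :: t => pvLast t (c + 1)

-- functional form of split-on-'\n' with an open current segment
def pvF (l : List Char) (cur : List Char) : List (List Char) :=
  match l with
  | [] => [cur.reverse]
  | '\n' :: t => cur.reverse :: pvF t []
  | c :: t => pvF t (c :: cur)

theorem pvF_ne_nil (l cur : List Char) : pvF l cur ≠ [] := by
  induction l generalizing cur with
  | nil => simp [pvF]
  | cons c t ih =>
      by_cases h : c = '\n'
      · subst h; simp [pvF]
      · simp only [pvF]
        exact ih _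

theorem go_eq (fuel : Nat) (l cur : List Char) (acc : List (List Char))
    (h : l.length ≤ fuel) :
    PySem.Chars.splitOn.go ['\n'] fuel l cur acc = acc.reverse ++ pvF l cur := by
  induction fuel generalizing l cur acc with
  | zero =>
      have hl : l = [] := by
        cases l with
        | nil => rfl
        | cons a t => simp at h
      subst hl
      simp [PySem.Chars.splitOn.go, pvF]
  | succ n ih =>
      cases l with
      | nil => simp [PySem.Chars.splitOn.go, pvF]
      | cons c t =>
          by_cases hc : c = '\n'
          · subst hc
            have hp : (['\n'] : List Char).isPrefixOf ('\n' :: t) = true := by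
              simp [List.isPrefixOf]
            simp only [PySem.Chars.splitOn.go, hp, if_pos]
            rw [ih]
            · simp [pvF]
            · simpa using Nat.le_of_succ_le_succ h
          · have hp : (['\n'] : List Char).isPrefixOf (c :: t) = false := by
              show (('\n' == c) && ([] : List Char).isPrefixOf t) = false
              have hb : ('\n' == c) = false := by
                simp only [beq_eq_false_iff_ne, ne_eq]
                exact fun hh => hc hh.symm
              rw [hb, Bool.false_and]
            simp only [PySem.Chars.splitOn.go, hp]
            rw [if_neg (by simp)]
            rw [ih]
            · simp [pvF]
            · simpa using Nat.le_of_succ_le_succ h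

theorem splitOn_eq_pvF (l : List Char) :
    PySem.Chars.splitOn l ['\n'] = pvF l [] := by
  have := go_eq (l.length + 1) l [] [] (by omega)
  simpa [PySem.Chars.splitOn] using this

theorem pvSegs_length_indep (t : List Char) (a b : Int) :
    (pvSegs t a).length = (pvSegs t b).length := by
  induction t generalizing a b with
  | nil => simp [pvSegs]
  | cons c t ih =>
      by_cases hc : c = '\n'
      · subst hc; simp [pvSegs]
      · simp only [pvSegs]
        exact ih _ _

theorem pvF_length (l cur : List Char) :
    (pvF l cur).length = (pvSegs l 0).length + 1 := by
  induction l generalizing cur with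
  | nil => simp [pvF, pvSegs]
  | cons c t ih =>
      by_cases hc : c = '\n'
      · subst hc; simp [pvF, pvSegs, ih]
      · simp only [pvF, pvSegs]
        rw [ih, pvSegs_length_indep t 0 (0 + 1)]

theorem pvF_dropLast (l cur : List Char) :
    ((pvF l cur).dropLast.map (fun s => (s.length : Int))) = pvSegs l (cur.length : Int) := by
  induction l generalizing cur with
  | nil => simp [pvF, pvSegs]
  | cons c t ih =>
      by_cases hc : c = '\n'
      · subst hc
        simp only [pvF, pvSegs]
        rw [List.dropLast_cons_of_ne_nil (pvF_ne_nil t [])]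
        simpa using ih []
      · simp only [pvF, pvSegs]
        have h2 := ih (c :: cur)
        simp only [List.length_cons] at h2
        push_cast at h2
        exact h2

theorem pvSegs_nonneg (l : List Char) (c : Int) (hc : 0 ≤ c) :
    ∀ x ∈ pvSegs l c, 0 ≤ x := by
  induction l generalizing c with
  | nil => simp [pvSegs]
  | cons a t ih =>
      by_cases ha : a = '\n'
      · subst ha
        simp only [pvSegs]
        intro x hx
        rcases List.mem_cons.mp hx with h | h
        · omega
        · exact ih 0 le_rfl x h
      · simp only [pvSegs]
        exact ih (c + 1) (by omega)

theorem stepA_nl (r m c : Int) : pvStepA (r, m, c) '\n' = (r + 1, max m c, 0) := by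
  simp only [pvStepA]
  rw [if_neg (by simp)]
  have h1 : (if c > m then c else m) = max m c := by
    split <;> omega
  rw [h1]

theorem stepA_ch (r m c : Int) (a : Char) (ha : a ≠ '\n') :
    pvStepA (r, m, c) a = (r, m, c + 1) := by
  simp [pvStepA, ha]

-- A's loop computed by pvSegs / pvLast
theorem foldA (l : List Char) (r m c : Int) :
    l.foldl pvStepA (r, m, c)
    = (r + (pvSegs l c).length, (pvSegs l c).foldl max m, pvLast l c) := by
  induction l generalizing r m c with
  | nil => simp [pvSegs, pvLast]
  | cons a t ih =>
      rw [List.foldl_cons]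
      by_cases ha : a = '\n'
      · subst ha
        rw [stepA_nl, ih]
        have h2 : pvSegs ('\n' :: t) c = c :: pvSegs t 0 := by simp [pvSegs]
        have h3 : pvLast ('\n' :: t) c = pvLast t 0 := by simp [pvLast]
        rw [h2, h3, List.foldl_cons, List.length_cons]
        push_cast
        congr 1
        omega
      · rw [stepA_ch _ _ _ _ ha, ih]
        simp only [pvSegs, pvLast]

theorem maxD_segs (xs : List Int) (h : ∀ x ∈ xs, 0 ≤ x) :
    PySem.List.maxD xs (fun x => x) 0 = xs.foldl max 0 := by
  cases xs with
  | nil => simp [PySem.List.maxD, PySem.List.max?]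
  | cons x t =>
      have hx : max 0 x = x := by
        have := h x (by simp)
        omega
      rw [List.foldl_cons, hx]
      simp [PySem.List.maxD, PySem.List.max?_id_cons]

-- ===== VERDICT (by name: the statement is the Claim_ definition above) =====
theorem getMaxRowCol_spec : Claim_equal_getMaxRowCol := by
  intro state _
  unfold Spec_getMaxRowCol getMaxRowCol getMaxRowCol_alt
  rw [foldA, splitOn_eq_pvF]
  have hdl := pvF_dropLast state.toList []
  have hlen := pvF_length state.toList []
  simp only [List.length_nil, Nat.cast_zero] at hdl
  simp only [hdl, hlen, Prod.mk.injEq]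
  refine ⟨by push_cast; ring, ?_⟩
  rw [maxD_segs _ (pvSegs_nonneg _ _ le_rfl)]
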